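-- pv_equiv track=rewrite | github.com/nethq/minecraft-multi-threaded-server-scanner | py-interface.py | generate_ip_strings
-- ===== SOURCE A (Python) =====
-- def generate_ip_strings(ip,mask):
--     """Mask = {8,16,24,32} | 8 = ip + .{}.{}.{}"""
--
--     mask = str(mask)
--     return_list = []
--     if "32" in mask:
--         return_list.append(ip)
--     elif "24" in mask:
--         for i in range(0,256):
--             return_list.append(f'{ip}.{i}')
--     elif "16" in mask:
--         for i in range(0,256):
--             for j in range(0,256):
--                 return_list.append(f'{ip}.{i}.{j}')
--     elif "8" in mask:
--         for i in range(0,256):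
--             for j in range(0,256):
--                 for k in range(0,256):
--                     return_list.append(f'{ip}.{i}.{j}.{k}')
--     return return_list
-- ===== SOURCE B (Python) =====
-- def generate_ip_strings(ip, mask):
--     """Mask = {8,16,24,32} | 8 = ip + .{}.{}.{}"""
--     if mask == 32:
--         return [ip]
--     depth = {24: 1, 16: 2, 8: 3}.get(mask)
--     if depth is None:
--         return []
--     out = []
--     for n in range(256 ** depth):
--         parts = []
--         x = n
--         for _ in range(depth):
--             x, r = divmod(x, 256)
--             parts.append(str(r))
--         parts.reverse()
--         out.append(f"{ip}." + ".".join(parts))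
--     return out
-- ===== Notes on version B (the rewrite author's own statement) =====
-- stated objective: alternative
-- what changed: B matches the mask exactly against 8/16/24/32 via a dict lookup instead of A's substring tests on str(mask), and replaces A's four branch-specific nested generation loops by one flat loop over range(256**depth) that decodes each counter into octets with divmod.
-- intended difference: On masks outside {8,16,24,32} whose decimal string merely contains '32', '24', '16' or '8' (e.g. 132, 124, 116, 48, -8), A's substring test fires and it returns a full address sweep (132 even returns [ip]), while B returns [], the intended result since the docstring admits only masks 8/16/24/32. — e.g. on generate_ip_strings("x", 132): A returns ["x"], B returns []
import Mathlib
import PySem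

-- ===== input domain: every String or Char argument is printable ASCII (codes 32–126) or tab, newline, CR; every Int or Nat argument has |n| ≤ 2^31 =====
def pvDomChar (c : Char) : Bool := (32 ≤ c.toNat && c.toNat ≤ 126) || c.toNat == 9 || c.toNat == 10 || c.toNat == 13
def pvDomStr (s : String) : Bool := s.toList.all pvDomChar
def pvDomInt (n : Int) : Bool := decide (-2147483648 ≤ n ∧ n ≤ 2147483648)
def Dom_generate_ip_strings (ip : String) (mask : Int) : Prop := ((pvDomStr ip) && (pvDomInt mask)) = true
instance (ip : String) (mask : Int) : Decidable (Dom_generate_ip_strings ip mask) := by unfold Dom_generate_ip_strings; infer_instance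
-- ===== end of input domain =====

-- B matches the mask exactly against 8/16/24/32 (a dict lookup) instead of A's substring tests on
-- str(mask), and replaces A's four branch-specific nested loops by one flat loop over
-- range(256**depth) that decodes each counter into octets with divmod (objective: alternative).

-- ===== PORT A =====
-- literal transliteration: substring tests on str(mask) in order, branch-specific append loops
-- (Python's 'mask = str(mask)' rebinding is inlined as 'PySem.Int.toStr mask' at each use)
def generate_ip_strings (ip : String) (mask : Int) : List String :=
  if PySem.Str.isIn "32" (PySem.Int.toStr mask) then
    ([] : List String) ++ [ip]
  else if PySem.Str.isIn "24" (PySem.Int.toStr mask) then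
    (PySem.List.pyRange 0 256 1).foldl
      (fun acc i => acc ++ [ip ++ "." ++ PySem.Int.toStr i]) []
  else if PySem.Str.isIn "16" (PySem.Int.toStr mask) then
    (PySem.List.pyRange 0 256 1).foldl
      (fun acc i =>
        (PySem.List.pyRange 0 256 1).foldl
          (fun acc2 j => acc2 ++ [ip ++ "." ++ PySem.Int.toStr i ++ "." ++ PySem.Int.toStr j]) acc) []
  else if PySem.Str.isIn "8" (PySem.Int.toStr mask) then
    (PySem.List.pyRange 0 256 1).foldl
      (fun acc i =>
        (PySem.List.pyRange 0 256 1).foldl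
          (fun acc2 j =>
            (PySem.List.pyRange 0 256 1).foldl
              (fun acc3 k => acc3 ++ [ip ++ "." ++ PySem.Int.toStr i ++ "." ++ PySem.Int.toStr j ++ "." ++ PySem.Int.toStr k]) acc2) acc) []
  else []

-- ===== PORT B =====
-- Source B's depth dict {24: 1, 16: 2, 8: 3}
def pvDepthTable : PySem.Dict Int Nat := PySem.Dict.ofList [(24, 1), (16, 2), (8, 3)]

-- Source B's inner divmod loop: parts in append order (least-significant octet first)
def pvPartsRev : Nat → Nat → List String
  | 0, _ => []
  | d+1, n => PySem.Int.toStr ((n % 256 : Nat) : Int) :: pvPartsRev d (n / 256)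

-- ".".join(parts)
def pvJoinDots : List String → String
  | [] => ""
  | [s] => s
  | s :: t :: rest => s ++ "." ++ pvJoinDots (t :: rest)

def generate_ip_strings_alt (ip : String) (mask : Int) : List String :=
  if mask == 32 then [ip]
  else
    match PySem.Dict.get? pvDepthTable mask with
    | none => []
    | some d =>
      (List.range (256 ^ d)).map (fun n =>
        ip ++ "." ++ pvJoinDots ((pvPartsRev d n).reverse))

-- ===== PRECONDITION & SPEC =====
-- On masks outside {8,16,24,32} whose decimal string merely contains "32", "24", "16" or "8"
-- (e.g. 132, 124, 116, 48, -8), A's substring test fires and it returns a full address sweep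
-- (132 even returns [ip]), while B returns [], the intended result since the docstring admits
-- only masks 8/16/24/32.
def D_generate_ip_strings (ip : String) (mask : Int) : Prop :=
  (PySem.Str.isIn "32" (PySem.Int.toStr mask) = true ∨
   PySem.Str.isIn "24" (PySem.Int.toStr mask) = true ∨
   PySem.Str.isIn "16" (PySem.Int.toStr mask) = true ∨
   PySem.Str.isIn "8" (PySem.Int.toStr mask) = true) ∧
  -- e.g. mask = -8 or mask = 48 lands here
  mask ≠ 32 ∧ mask ≠ 24 ∧ mask ≠ 16 ∧ mask ≠ 8
instance (ip : String) (mask : Int) : Decidable (D_generate_ip_strings ip mask) := by unfold D_generate_ip_strings; infer_instance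

def Spec_generate_ip_strings (ip : String) (mask : Int) (out : List String) : Prop := ¬ D_generate_ip_strings ip mask → out = generate_ip_strings_alt ip mask
instance (ip : String) (mask : Int) (out : List String) : Decidable (Spec_generate_ip_strings ip mask out) := by unfold Spec_generate_ip_strings; infer_instance

def pvDiffWitness_generate_ip_strings : String × Int := ("x", 132)
def pvDiffWitnessOut_generate_ip_strings : (List String) × (List String) := (["x"], [])

-- ===== CLAIM (what is proved, stated in full; the proofs are below) =====
def Claim_unchanged_generate_ip_strings : Prop := ∀ (ip : String) (mask : Int), Dom_generate_ip_strings ip mask → Spec_generate_ip_strings ip mask (generate_ip_strings ip mask)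
def Claim_changed_generate_ip_strings : Prop := Dom_generate_ip_strings (pvDiffWitness_generate_ip_strings.1) (pvDiffWitness_generate_ip_strings.2) ∧ D_generate_ip_strings (pvDiffWitness_generate_ip_strings.1) (pvDiffWitness_generate_ip_strings.2) ∧ generate_ip_strings (pvDiffWitness_generate_ip_strings.1) (pvDiffWitness_generate_ip_strings.2) = pvDiffWitnessOut_generate_ip_strings.1 ∧ generate_ip_strings_alt (pvDiffWitness_generate_ip_strings.1) (pvDiffWitness_generate_ip_strings.2) = pvDiffWitnessOut_generate_ip_strings.2 ∧ pvDiffWitnessOut_generate_ip_strings.1 ≠ pvDiffWitnessOut_generate_ip_strings.2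
def Claim_exact_generate_ip_strings : Prop := ∀ (ip : String) (mask : Int), Dom_generate_ip_strings ip mask → D_generate_ip_strings ip mask → generate_ip_strings ip mask ≠ generate_ip_strings_alt ip mask

-- ===== LEMMAS AND PROOFS =====

theorem pvFlatMap_congr_mem {α β : Type} {l : List α} {f g : α → List β}
    (h : ∀ x ∈ l, f x = g x) : l.flatMap f = l.flatMap g := by
  induction l with
  | nil => rfl
  | cons x xs ih =>
    simp only [List.flatMap_cons]
    rw [h x List.mem_cons_self, ih (fun y hy => h y (List.mem_cons_of_mem _ hy))]

theorem pvRange_mul_flatMap (a b : Nat) :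
    List.range (a * b) = (List.range a).flatMap (fun i => (List.range b).map (fun j => b * i + j)) := by
  induction a with
  | zero => simp
  | succ a ih =>
    rw [Nat.succ_mul, List.range_add, ih, List.range_succ, List.flatMap_append]
    simp [Nat.mul_comm]

theorem pvPyRange256 : PySem.List.pyRange 0 256 1 = (List.range 256).map (fun k => ((k : Nat) : Int)) := by
  have h : ((256:Int) - 0).toNat = 256 := by decide
  rw [PySem.List.pyRange_one, h]
  exact List.map_congr_left (fun k _ => by simp)

theorem pvEq24 (ip : String) :
    (PySem.List.pyRange 0 256 1).foldl
      (fun acc i => acc ++ [ip ++ "." ++ PySem.Int.toStr i]) [] =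
    (List.range (256 ^ 1)).map (fun n => ip ++ "." ++ pvJoinDots ((pvPartsRev 1 n).reverse)) := by
  rw [PySem.List.foldl_append_singleton_eq_map, List.nil_append, pvPyRange256, List.map_map,
    show (256:Nat)^1 = 256 from by norm_num]
  apply List.map_congr_left
  intro n hn
  have hn' : n < 256 := List.mem_range.mp hn
  simp [pvPartsRev, pvJoinDots, Nat.mod_eq_of_lt hn']

theorem pvEq16 (ip : String) :
    (PySem.List.pyRange 0 256 1).foldl
      (fun acc i =>
        (PySem.List.pyRange 0 256 1).foldl
          (fun acc2 j => acc2 ++ [ip ++ "." ++ PySem.Int.toStr i ++ "." ++ PySem.Int.toStr j]) acc) [] =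
    (List.range (256 ^ 2)).map (fun n => ip ++ "." ++ pvJoinDots ((pvPartsRev 2 n).reverse)) := by
  simp only [PySem.List.foldl_append_singleton_eq_map]
  rw [PySem.List.foldl_append_eq_flatMap, List.nil_append, pvPyRange256, List.flatMap_map,
    show (256:Nat)^2 = 256*256 from by norm_num, pvRange_mul_flatMap, List.map_flatMap]
  apply pvFlatMap_congr_mem
  intro i hi
  have hi' : i < 256 := List.mem_range.mp hi
  rw [List.map_map, List.map_map]
  apply List.map_congr_left
  intro j hj
  have hj' : j < 256 := List.mem_range.mp hj
  have hd : (256 * i + j) / 256 % 256 = i := by omega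
  have hm : (256 * i + j) % 256 = j := by omega
  simp only [Function.comp_apply, pvPartsRev, pvJoinDots, List.reverse_cons, List.reverse_nil,
    List.nil_append, List.cons_append, hd, hm, String.append_assoc]

theorem pvEq8 (ip : String) :
    (PySem.List.pyRange 0 256 1).foldl
      (fun acc i =>
        (PySem.List.pyRange 0 256 1).foldl
          (fun acc2 j =>
            (PySem.List.pyRange 0 256 1).foldl
              (fun acc3 k => acc3 ++ [ip ++ "." ++ PySem.Int.toStr i ++ "." ++ PySem.Int.toStr j ++ "." ++ PySem.Int.toStr k]) acc2) acc) [] =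
    (List.range (256 ^ 3)).map (fun n => ip ++ "." ++ pvJoinDots ((pvPartsRev 3 n).reverse)) := by
  have hinner : ∀ (acc : List String) (i : Int),
      (PySem.List.pyRange 0 256 1).foldl
        (fun acc2 j =>
          (PySem.List.pyRange 0 256 1).foldl
            (fun acc3 k => acc3 ++ [ip ++ "." ++ PySem.Int.toStr i ++ "." ++ PySem.Int.toStr j ++ "." ++ PySem.Int.toStr k]) acc2) acc
      = acc ++ (PySem.List.pyRange 0 256 1).flatMap (fun j =>
          (PySem.List.pyRange 0 256 1).map (fun k =>
            ip ++ "." ++ PySem.Int.toStr i ++ "." ++ PySem.Int.toStr j ++ "." ++ PySem.Int.toStr k)) := by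
    intro acc i
    simp only [PySem.List.foldl_append_singleton_eq_map]
    rw [PySem.List.foldl_append_eq_flatMap]
  have houter :
      (PySem.List.pyRange 0 256 1).foldl
        (fun acc i =>
          (PySem.List.pyRange 0 256 1).foldl
            (fun acc2 j =>
              (PySem.List.pyRange 0 256 1).foldl
                (fun acc3 k => acc3 ++ [ip ++ "." ++ PySem.Int.toStr i ++ "." ++ PySem.Int.toStr j ++ "." ++ PySem.Int.toStr k]) acc2) acc) []
      = (PySem.List.pyRange 0 256 1).foldl
          (fun acc i => acc ++ (PySem.List.pyRange 0 256 1).flatMap (fun j =>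
            (PySem.List.pyRange 0 256 1).map (fun k =>
              ip ++ "." ++ PySem.Int.toStr i ++ "." ++ PySem.Int.toStr j ++ "." ++ PySem.Int.toStr k))) [] :=
    PySem.List.foldl_congr_mem _ _ _ _ (fun acc i _ => hinner acc i)
  rw [houter,
    PySem.List.foldl_append_eq_flatMap, List.nil_append, pvPyRange256, List.flatMap_map,
    show (256:Nat)^3 = 256*(256*256) from by norm_num, pvRange_mul_flatMap, List.map_flatMap]
  apply pvFlatMap_congr_mem
  intro i hi
  have hi' : i < 256 := List.mem_range.mp hi
  rw [List.flatMap_map, pvRange_mul_flatMap 256 256, List.map_flatMap, List.map_flatMap]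
  apply pvFlatMap_congr_mem
  intro j hj
  have hj' : j < 256 := List.mem_range.mp hj
  rw [List.map_map, List.map_map, List.map_map]
  apply List.map_congr_left
  intro k hk
  have hk' : k < 256 := List.mem_range.mp hk
  have e1 : (256 * 256 * i + (256 * j + k)) % 256 = k := by omega
  have e2 : (256 * 256 * i + (256 * j + k)) / 256 % 256 = j := by omega
  have e3 : (256 * 256 * i + (256 * j + k)) / 256 / 256 % 256 = i := by omega
  simp only [Function.comp_apply, pvPartsRev, pvJoinDots, List.reverse_cons, List.reverse_nil,
    List.nil_append, List.cons_append, e1, e2, e3, String.append_assoc]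

-- the four literal-mask values of each port

theorem pvA32 (ip : String) : generate_ip_strings ip 32 = [ip] := by
  unfold generate_ip_strings
  rw [if_pos (by decide : PySem.Str.isIn "32" (PySem.Int.toStr 32) = true)]
  rfl

theorem pvA24 (ip : String) : generate_ip_strings ip 24 =
    (List.range (256 ^ 1)).map (fun n => ip ++ "." ++ pvJoinDots ((pvPartsRev 1 n).reverse)) := by
  unfold generate_ip_strings
  rw [if_neg (by decide : ¬ PySem.Str.isIn "32" (PySem.Int.toStr 24) = true),
    if_pos (by decide : PySem.Str.isIn "24" (PySem.Int.toStr 24) = true)]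
  exact pvEq24 ip

theorem pvA16 (ip : String) : generate_ip_strings ip 16 =
    (List.range (256 ^ 2)).map (fun n => ip ++ "." ++ pvJoinDots ((pvPartsRev 2 n).reverse)) := by
  unfold generate_ip_strings
  rw [if_neg (by decide : ¬ PySem.Str.isIn "32" (PySem.Int.toStr 16) = true),
    if_neg (by decide : ¬ PySem.Str.isIn "24" (PySem.Int.toStr 16) = true),
    if_pos (by decide : PySem.Str.isIn "16" (PySem.Int.toStr 16) = true)]
  exact pvEq16 ip

theorem pvA8 (ip : String) : generate_ip_strings ip 8 =
    (List.range (256 ^ 3)).map (fun n => ip ++ "." ++ pvJoinDots ((pvPartsRev 3 n).reverse)) := by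
  unfold generate_ip_strings
  rw [if_neg (by decide : ¬ PySem.Str.isIn "32" (PySem.Int.toStr 8) = true),
    if_neg (by decide : ¬ PySem.Str.isIn "24" (PySem.Int.toStr 8) = true),
    if_neg (by decide : ¬ PySem.Str.isIn "16" (PySem.Int.toStr 8) = true),
    if_pos (by decide : PySem.Str.isIn "8" (PySem.Int.toStr 8) = true)]
  exact pvEq8 ip

theorem pvAnone (ip : String) (mask : Int)
    (h32 : ¬ PySem.Str.isIn "32" (PySem.Int.toStr mask) = true)
    (h24 : ¬ PySem.Str.isIn "24" (PySem.Int.toStr mask) = true)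
    (h16 : ¬ PySem.Str.isIn "16" (PySem.Int.toStr mask) = true)
    (h8 : ¬ PySem.Str.isIn "8" (PySem.Int.toStr mask) = true) :
    generate_ip_strings ip mask = [] := by
  unfold generate_ip_strings
  rw [if_neg h32, if_neg h24, if_neg h16, if_neg h8]

theorem pvB32 (ip : String) : generate_ip_strings_alt ip 32 = [ip] := by
  unfold generate_ip_strings_alt
  rw [if_pos (by decide : ((32:Int) == 32) = true)]

theorem pvB24 (ip : String) : generate_ip_strings_alt ip 24 =
    (List.range (256 ^ 1)).map (fun n => ip ++ "." ++ pvJoinDots ((pvPartsRev 1 n).reverse)) := by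
  unfold generate_ip_strings_alt
  rw [if_neg (by decide : ¬ ((24:Int) == 32) = true),
    show PySem.Dict.get? pvDepthTable 24 = some 1 from by decide]

theorem pvB16 (ip : String) : generate_ip_strings_alt ip 16 =
    (List.range (256 ^ 2)).map (fun n => ip ++ "." ++ pvJoinDots ((pvPartsRev 2 n).reverse)) := by
  unfold generate_ip_strings_alt
  rw [if_neg (by decide : ¬ ((16:Int) == 32) = true),
    show PySem.Dict.get? pvDepthTable 16 = some 2 from by decide]

theorem pvB8 (ip : String) : generate_ip_strings_alt ip 8 =
    (List.range (256 ^ 3)).map (fun n => ip ++ "." ++ pvJoinDots ((pvPartsRev 3 n).reverse)) := by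
  unfold generate_ip_strings_alt
  rw [if_neg (by decide : ¬ ((8:Int) == 32) = true),
    show PySem.Dict.get? pvDepthTable 8 = some 3 from by decide]

theorem pvBnone (ip : String) (mask : Int)
    (h32 : mask ≠ 32) (h24 : mask ≠ 24) (h16 : mask ≠ 16) (h8 : mask ≠ 8) :
    generate_ip_strings_alt ip mask = [] := by
  unfold generate_ip_strings_alt
  have htab : pvDepthTable = PySem.Dict.mk [((24:Int), (1:Nat)), (16, 2), (8, 3)] := by decide
  rw [if_neg (fun hh => h32 (beq_iff_eq.mp hh)),
    show PySem.Dict.get? pvDepthTable mask = none from by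
      rw [htab, PySem.Dict.get?_mk_cons, if_neg (fun hh => h24 (beq_iff_eq.mp hh).symm),
        PySem.Dict.get?_mk_cons, if_neg (fun hh => h16 (beq_iff_eq.mp hh).symm),
        PySem.Dict.get?_mk_cons, if_neg (fun hh => h8 (beq_iff_eq.mp hh).symm)]
      rfl]

-- for a mask in {32,24,16,8}, the pattern that fires identifies the mask (decidable checks)
theorem pvMaskCases (ip : String) (mask : Int)
    (hnd : ¬ D_generate_ip_strings ip mask)
    (hpat : PySem.Str.isIn "32" (PySem.Int.toStr mask) = true ∨
      PySem.Str.isIn "24" (PySem.Int.toStr mask) = true ∨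
      PySem.Str.isIn "16" (PySem.Int.toStr mask) = true ∨
      PySem.Str.isIn "8" (PySem.Int.toStr mask) = true) :
    mask = 32 ∨ mask = 24 ∨ mask = 16 ∨ mask = 8 := by
  by_contra hc
  push_neg at hc
  exact hnd ⟨hpat, hc.1, hc.2.1, hc.2.2.1, hc.2.2.2⟩

-- ===== VERDICT (by name: the statement is the Claim_ definition above) =====
theorem generate_ip_strings_spec : Claim_unchanged_generate_ip_strings := by
  intro ip mask _ hnd
  by_cases h32 : PySem.Str.isIn "32" (PySem.Int.toStr mask) = true
  · rcases pvMaskCases ip mask hnd (Or.inl h32) with h|h|h|h <;> subst h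
    · rw [pvA32, pvB32]
    · exact absurd h32 (by decide)
    · exact absurd h32 (by decide)
    · exact absurd h32 (by decide)
  · by_cases h24 : PySem.Str.isIn "24" (PySem.Int.toStr mask) = true
    · rcases pvMaskCases ip mask hnd (Or.inr (Or.inl h24)) with h|h|h|h <;> subst h
      · exact absurd h24 (by decide)
      · rw [pvA24, pvB24]
      · exact absurd h24 (by decide)
      · exact absurd h24 (by decide)
    · by_cases h16 : PySem.Str.isIn "16" (PySem.Int.toStr mask) = true
      · rcases pvMaskCases ip mask hnd (Or.inr (Or.inr (Or.inl h16))) with h|h|h|h <;> subst h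
        · exact absurd h16 (by decide)
        · exact absurd h16 (by decide)
        · rw [pvA16, pvB16]
        · exact absurd h16 (by decide)
      · by_cases h8 : PySem.Str.isIn "8" (PySem.Int.toStr mask) = true
        · rcases pvMaskCases ip mask hnd (Or.inr (Or.inr (Or.inr h8))) with h|h|h|h <;> subst h
          · exact absurd h8 (by decide)
          · exact absurd h8 (by decide)
          · exact absurd h8 (by decide)
          · rw [pvA8, pvB8]
        · have hne32 : mask ≠ 32 := fun h => h32 (by subst h; decide)
          have hne24 : mask ≠ 24 := fun h => h24 (by subst h; decide)
          have hne16 : mask ≠ 16 := fun h => h16 (by subst h; decide)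
          have hne8 : mask ≠ 8 := fun h => h8 (by subst h; decide)
          rw [pvAnone ip mask h32 h24 h16 h8, pvBnone ip mask hne32 hne24 hne16 hne8]

theorem generate_ip_strings_changed : Claim_changed_generate_ip_strings := by
  unfold Claim_changed_generate_ip_strings; decide

theorem generate_ip_strings_tight : Claim_exact_generate_ip_strings := by
  intro ip mask _ hd
  obtain ⟨hpat, hne32, hne24, hne16, hne8⟩ := hd
  rw [pvBnone ip mask hne32 hne24 hne16 hne8]
  by_cases h32 : PySem.Str.isIn "32" (PySem.Int.toStr mask) = true
  · unfold generate_ip_strings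
    rw [if_pos h32]
    simp
  · by_cases h24 : PySem.Str.isIn "24" (PySem.Int.toStr mask) = true
    · unfold generate_ip_strings
      rw [if_neg h32, if_pos h24, pvEq24 ip]
      simp [List.map_eq_nil_iff, List.range_eq_nil]
    · by_cases h16 : PySem.Str.isIn "16" (PySem.Int.toStr mask) = true
      · unfold generate_ip_strings
        rw [if_neg h32, if_neg h24, if_pos h16, pvEq16 ip]
        simp [List.map_eq_nil_iff, List.range_eq_nil]
      · by_cases h8 : PySem.Str.isIn "8" (PySem.Int.toStr mask) = true
        · unfold generate_ip_strings
          rw [if_neg h32, if_neg h24, if_neg h16, if_pos h8, pvEq8 ip]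
          simp [List.map_eq_nil_iff, List.range_eq_nil]
        · rcases hpat with h|h|h|h <;> contradiction
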